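-- pv_equiv track=rewrite | github.com/supermitch/Advent-of-Code | 2019/08/eight.py | chunk_data
-- ===== SOURCE A (Python) =====
-- def chunk_data(data, width, height):
--     layer_size = width * height
--     layer_count = len(data) // layer_size
--     layers = []
--     for i in range(layer_count):
--         layer_data = data[i * layer_size: (i + 1) * layer_size]
--         layer = []
--         for j in range(height):
--             layer.append(layer_data[j * width: (j + 1) * width])
--         layers.append(layer)
--     return layers
-- ===== SOURCE B (Python) =====
-- def chunk_data(data, width, height):
--     layer_size = width * height
--     layer_count = len(data) // layer_size
--     if layer_count <= 0:
--         return []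
--     rows = [data[r * width:(r + 1) * width] for r in range(layer_count * height)]
--     return [rows[i * height:(i + 1) * height] for i in range(layer_count)]
-- ===== Notes on version B (the rewrite author's own statement) =====
-- stated objective: alternative
-- what changed: Replaces A's nested per-layer/per-row slicing with two sequential passes: first build the flat list of all rows by slicing data directly, then partition that row list into layers by list slicing.
import Mathlib
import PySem

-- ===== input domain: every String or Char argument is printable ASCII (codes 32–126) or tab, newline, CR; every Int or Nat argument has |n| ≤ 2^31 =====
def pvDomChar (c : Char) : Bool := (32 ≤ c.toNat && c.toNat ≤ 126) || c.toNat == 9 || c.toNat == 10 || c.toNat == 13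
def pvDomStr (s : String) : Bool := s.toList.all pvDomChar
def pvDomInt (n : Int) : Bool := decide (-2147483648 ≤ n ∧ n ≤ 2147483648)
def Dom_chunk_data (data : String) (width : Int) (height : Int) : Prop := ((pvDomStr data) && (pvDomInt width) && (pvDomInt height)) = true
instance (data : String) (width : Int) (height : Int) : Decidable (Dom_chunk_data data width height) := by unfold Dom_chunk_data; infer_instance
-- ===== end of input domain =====

-- B replaces A's nested per-layer/per-row slicing by two sequential passes (build the flat
-- list of all rows from data, then partition that row list into layers); return values agree
-- whenever width*height ≠ 0 (otherwise both Pythons raise ZeroDivisionError).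

-- ===== PORT A =====
def chunk_data (data : String) (width : Int) (height : Int) : List (List String) :=
  let layer_size := width * height
  let layer_count := PySem.Int.floordiv (PySem.Str.len data) layer_size
  (PySem.List.pyRange 0 layer_count 1).foldl (fun layers i =>
    let layer_data := PySem.Str.slice data (some (i * layer_size)) (some ((i + 1) * layer_size))
    layers ++ [(PySem.List.pyRange 0 height 1).foldl (fun layer j =>
      layer ++ [PySem.Str.slice layer_data (some (j * width)) (some ((j + 1) * width))]) []]) []

-- ===== PORT B =====
def chunk_data_alt (data : String) (width : Int) (height : Int) : List (List String) :=
  let layer_size := width * height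
  let layer_count := PySem.Int.floordiv (PySem.Str.len data) layer_size
  if layer_count ≤ 0 then [] else
  let rows := (PySem.List.pyRange 0 (layer_count * height) 1).map
    (fun r => PySem.Str.slice data (some (r * width)) (some ((r + 1) * width)))
  (PySem.List.pyRange 0 layer_count 1).map
    (fun i => PySem.List.slice rows (some (i * height)) (some ((i + 1) * height)))

-- ===== PRECONDITION & SPEC =====
-- Pre_ excludes exactly width*height = 0, where the Python A raises ZeroDivisionError.
def Pre_chunk_data (data : String) (width : Int) (height : Int) : Prop :=
  width * height ≠ 0
instance (data : String) (width : Int) (height : Int) : Decidable (Pre_chunk_data data width height) := by unfold Pre_chunk_data; infer_instance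
def pvWitness_chunk_data : String × Int × Int := ("123456789012", 3, 2)

def Spec_chunk_data (data : String) (width : Int) (height : Int) (out : List (List String)) : Prop := out = chunk_data_alt data width height
instance (data : String) (width : Int) (height : Int) (out : List (List String)) : Decidable (Spec_chunk_data data width height out) := by unfold Spec_chunk_data; infer_instance

-- ===== CLAIM (what is proved, stated in full; the proofs are below) =====
def Claim_equal_chunk_data : Prop := ∀ (data : String) (width : Int) (height : Int), Dom_chunk_data data width height → Pre_chunk_data data width height → Spec_chunk_data data width height (chunk_data data width height)

-- ===== LEMMAS AND PROOFS =====

-- slicing the empty list yields the empty list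
theorem pv_slice_nil {α : Type} (a b : Int) : PySem.List.slice ([] : List α) (some a) (some b) = [] := by
  apply List.eq_nil_of_length_eq_zero
  have h1 := PySem.List.clampIdx_le ([] : List α).length b
  have h2 := PySem.List.clampIdx_le ([] : List α).length a
  rw [PySem.List.length_slice]
  simp only [List.length_nil] at h1 h2 ⊢
  omega

-- taking row j of layer i out of the layer-i block of s is the same as taking row i*H+j of s
theorem pv_slice_comp (s : List Char) (W H I j : Nat) (hj : j < H) :
    List.take ((j + 1) * W - j * W)
      (List.drop (j * W) (List.take ((I + 1) * (W * H) - I * (W * H)) (List.drop (I * (W * H)) s)))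
    = List.take ((I * H + j + 1) * W - (I * H + j) * W) (List.drop ((I * H + j) * W) s) := by
  have hA : (I + 1) * (W * H) - I * (W * H) = W * H := by
    have : (I + 1) * (W * H) = I * (W * H) + W * H := by ring
    omega
  have hB : (j + 1) * W - j * W = W := by
    have : (j + 1) * W = j * W + W := by ring
    omega
  have hC : (I * H + j + 1) * W - (I * H + j) * W = W := by
    have : (I * H + j + 1) * W = (I * H + j) * W + W := by ring
    omega
  have hD : I * (W * H) + j * W = (I * H + j) * W := by ring
  have hE : j * W + W ≤ W * H := by
    calc j * W + W = (j + 1) * W := by ring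
      _ ≤ H * W := Nat.mul_le_mul_right W hj
      _ = W * H := Nat.mul_comm H W
  rw [hA, hB, hC, List.drop_take, List.drop_drop, hD, List.take_take,
    Nat.min_eq_left (Nat.le_sub_of_add_le (by omega))]

-- ===== VERDICT (by name: the statement is the Claim_ definition above) =====
theorem chunk_data_spec : Claim_equal_chunk_data := by
  intro data width height _ hpre
  unfold Pre_chunk_data at hpre
  unfold Spec_chunk_data chunk_data chunk_data_alt
  simp only [PySem.List.foldl_append_singleton_eq_map, List.nil_append]
  by_cases hlc0 : PySem.Int.floordiv (PySem.Str.len data) (width * height) ≤ 0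
  · rw [if_pos hlc0, PySem.List.pyRange_one_eq_nil hlc0, List.map_nil]
  rw [if_neg hlc0]
  apply List.map_congr_left
  intro iv hiv
  rw [PySem.List.mem_pyRange_one] at hiv
  obtain ⟨hi0, hilt⟩ := hiv
  have hlc : 0 < PySem.Int.floordiv (PySem.Str.len data) (width * height) :=
    lt_of_le_of_lt hi0 hilt
  by_cases hh : height ≤ 0
  · -- height ≤ 0: each layer is [], and the row list is empty so every list-slice of it is []
    have hmul : PySem.Int.floordiv (PySem.Str.len data) (width * height) * height ≤ 0 :=
      mul_nonpos_of_nonneg_of_nonpos hlc.le hh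
    rw [PySem.List.pyRange_one_eq_nil hh, PySem.List.pyRange_one_eq_nil hmul]
    simp [pv_slice_nil]
  · push Not at hh
    have hw : 0 < width := by
      by_contra hwle
      push Not at hwle
      have hls : width * height < 0 :=
        lt_of_le_of_ne (mul_nonpos_of_nonpos_of_nonneg hwle hh.le) hpre
      have h1 := PySem.Int.floordiv_mul_add_mod (PySem.Str.len data) (width * height)
      have h2 := (PySem.Int.mod_neg_bounds (PySem.Str.len data) hls).2
      have h3 : (0 : Int) ≤ PySem.Str.len data := by
        rw [PySem.Str.len_eq]; exact Int.natCast_nonneg _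
      nlinarith [mul_pos hlc (neg_pos.mpr hls)]
    obtain ⟨W, rfl⟩ := Int.eq_ofNat_of_zero_le hw.le
    obtain ⟨H, rfl⟩ := Int.eq_ofNat_of_zero_le hh.le
    obtain ⟨I, rfl⟩ := Int.eq_ofNat_of_zero_le hi0
    obtain ⟨L, hL⟩ := Int.eq_ofNat_of_zero_le hlc.le
    rw [hL] at hilt ⊢
    have hIL : I < L := by exact_mod_cast hilt
    -- lift every Int bound to a Nat cast
    have e1 : ((I : Int) * (H : Int)) = ((I * H : Nat) : Int) := by push_cast; ring
    have e2 : (((I : Int) + 1) * (H : Int)) = (((I + 1) * H : Nat) : Int) := by push_cast; ring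
    have e3 : ((L : Int) * (H : Int)) = ((L * H : Nat) : Int) := by push_cast; ring
    rw [e1, e2, e3]
    apply List.ext_getElem
    · -- lengths: both sides have H rows
      rw [List.length_map, PySem.List.length_pyRange_one, PySem.List.length_slice]
      rw [List.length_map, PySem.List.length_pyRange_one]
      simp only [Int.sub_zero, Int.toNat_natCast, PySem.List.clampIdx_natCast]
      have m1 : min ((I + 1) * H) (L * H) = (I + 1) * H :=
        Nat.min_eq_left (Nat.mul_le_mul_right H hIL)
      have m2 : min (I * H) (L * H) = I * H :=
        Nat.min_eq_left (Nat.mul_le_mul_right H (le_of_lt hIL))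
      rw [m1, m2]
      have : (I + 1) * H = I * H + H := by ring
      omega
    · intro j hj1 hj2
      have hjH : j < H := by
        rw [List.length_map, PySem.List.length_pyRange_one] at hj1
        omega
      rw [List.getElem_map, PySem.List.getElem_pyRange_one]
      simp only [PySem.List.slice_natCast, List.getElem_take, List.getElem_drop,
        List.getElem_map, PySem.List.getElem_pyRange_one, zero_add]
      apply String.toList_inj.mp
      simp only [PySem.Str.toList_slice, PySem.Chars.slice_eq_listSlice]
      have f1 : ((j : Int) * (W : Int)) = ((j * W : Nat) : Int) := by push_cast; ring
      have f2 : (((j : Int) + 1) * (W : Int)) = (((j + 1) * W : Nat) : Int) := by push_cast; ring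
      have f3 : ((I : Int) * ((W : Int) * (H : Int))) = ((I * (W * H) : Nat) : Int) := by push_cast; ring
      have f4 : (((I : Int) + 1) * ((W : Int) * (H : Int))) = (((I + 1) * (W * H) : Nat) : Int) := by push_cast; ring
      have f5 : (((I * H + j : Nat) : Int) * (W : Int)) = (((I * H + j) * W : Nat) : Int) := by push_cast; ring
      have f6 : (((I * H + j : Nat) : Int) + 1) * (W : Int) = (((I * H + j + 1) * W : Nat) : Int) := by push_cast; ring
      rw [f1, f2, f3, f4, f5, f6, PySem.List.slice_natCast, PySem.List.slice_natCast,
        PySem.List.slice_natCast]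
      exact pv_slice_comp data.toList W H I j hjH
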